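-- pv_equiv track=rewrite | github.com/amcc1996/advent-of-code-2024 | day13/main.py | compute_find_cheapest_brute_force
-- ===== SOURCE A (Python) =====
-- def compute_find_cheapest_brute_force(x_A, y_A, x_B, y_B, x_prize, y_prize, n_max, price_A, price_B):
--     cheapest = 0
--     nA = 0
--     nB = 0
--     is_first = True
--     for i_A in range(1, n_max+1):
--         for i_B in range(1, n_max+1):
--             if (i_A * x_A + i_B * x_B) == x_prize and (i_A * y_A + i_B * y_B) == y_prize:
--                 cost = i_A * price_A + i_B * price_B
--                 if cost < cheapest or is_first:
--                     cheapest = cost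
--                     nA = i_A
--                     nB = i_B
--                     is_first = False
--
--     return cheapest, nA, nB
-- ===== SOURCE B (Python) =====
-- def compute_find_cheapest_brute_force(x_A, y_A, x_B, y_B, x_prize, y_prize, n_max, price_A, price_B):
--     # Single pass over a: for each a the matching b is determined by the linear
--     # equations (or, when both B-coefficients are zero, chosen by the sign of price_B).
--     best = None
--     for a in range(1, n_max + 1):
--         rx = x_prize - a * x_A
--         ry = y_prize - a * y_A
--         b = None
--         if x_B != 0:
--             q = rx // x_B
--             if q * x_B == rx and 1 <= q <= n_max and q * y_B == ry:
--                 b = q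
--         elif y_B != 0:
--             q = ry // y_B
--             if rx == 0 and q * y_B == ry and 1 <= q <= n_max:
--                 b = q
--         else:
--             if rx == 0 and ry == 0:
--                 b = n_max if price_B < 0 else 1
--         if b is not None:
--             cost = a * price_A + b * price_B
--             if best is None or cost < best[0]:
--                 best = (cost, a, b)
--     if best is None:
--         return 0, 0, 0
--     return best[0], best[1], best[2]
-- ===== Notes on version B (the rewrite author's own statement) =====
-- stated objective: faster
-- what changed: Replaces the O(n_max^2) double scan over all (a,b) pairs by a single pass over a that computes the unique matching b by exact division of the linear equations (or picks the price-optimal b directly when both B-coefficients are zero).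
import Mathlib
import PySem

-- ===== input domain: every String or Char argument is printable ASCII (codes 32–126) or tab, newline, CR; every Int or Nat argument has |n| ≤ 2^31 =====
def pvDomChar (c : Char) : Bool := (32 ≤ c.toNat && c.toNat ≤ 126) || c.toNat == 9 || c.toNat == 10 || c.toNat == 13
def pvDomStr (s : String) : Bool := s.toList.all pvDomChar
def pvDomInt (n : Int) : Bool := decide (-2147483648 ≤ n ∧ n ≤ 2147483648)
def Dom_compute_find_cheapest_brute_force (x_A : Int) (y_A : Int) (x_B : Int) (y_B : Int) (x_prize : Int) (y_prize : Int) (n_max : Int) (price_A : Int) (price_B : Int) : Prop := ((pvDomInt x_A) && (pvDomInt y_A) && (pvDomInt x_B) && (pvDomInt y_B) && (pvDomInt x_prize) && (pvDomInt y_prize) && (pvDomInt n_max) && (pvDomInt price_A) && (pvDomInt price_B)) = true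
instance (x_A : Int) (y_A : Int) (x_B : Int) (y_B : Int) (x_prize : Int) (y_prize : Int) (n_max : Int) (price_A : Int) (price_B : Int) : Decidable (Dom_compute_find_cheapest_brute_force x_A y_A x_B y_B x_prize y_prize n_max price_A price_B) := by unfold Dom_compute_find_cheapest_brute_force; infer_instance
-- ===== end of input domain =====

-- B replaces A's O(n_max^2) double scan by a single pass over a, computing the matching b
-- for each a directly from the linear equations (objective: faster, asymptotic).

-- ===== PORT A =====
-- inner 'if cost < cheapest or is_first: update' of A
def pvU (s : Int × Int × Int × Bool) (c a b : Int) : Int × Int × Int × Bool :=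
  if c < s.1 ∨ s.2.2.2 = true then (c, a, b, false) else s

-- body of A's inner loop for a fixed i_A = a
def pvStepA (x_A y_A x_B y_B x_prize y_prize price_A price_B a : Int)
    (s : Int × Int × Int × Bool) (b : Int) : Int × Int × Int × Bool :=
  if a * x_A + b * x_B = x_prize ∧ a * y_A + b * y_B = y_prize then
    pvU s (a * price_A + b * price_B) a b
  else s

def compute_find_cheapest_brute_force (x_A : Int) (y_A : Int) (x_B : Int) (y_B : Int) (x_prize : Int) (y_prize : Int) (n_max : Int) (price_A : Int) (price_B : Int) : List Int :=
  let s := (PySem.List.pyRange 1 (n_max + 1) 1).foldl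
    (fun s iA => (PySem.List.pyRange 1 (n_max + 1) 1).foldl
      (pvStepA x_A y_A x_B y_B x_prize y_prize price_A price_B iA) s)
    (0, 0, 0, true)
  [s.1, s.2.1, s.2.2.1]

-- ===== PORT B =====
-- the b (if any) that B pairs with a given a
def pvCand (x_A y_A x_B y_B x_prize y_prize n_max price_B a : Int) : Option Int :=
  let rx := x_prize - a * x_A
  let ry := y_prize - a * y_A
  if x_B ≠ 0 then
    let q := PySem.Int.floordiv rx x_B
    if q * x_B = rx ∧ 1 ≤ q ∧ q ≤ n_max ∧ q * y_B = ry then some q else none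
  else if y_B ≠ 0 then
    let q := PySem.Int.floordiv ry y_B
    if rx = 0 ∧ q * y_B = ry ∧ 1 ≤ q ∧ q ≤ n_max then some q else none
  else
    if rx = 0 ∧ ry = 0 then some (if price_B < 0 then n_max else 1) else none

-- body of B's single loop
def pvStepB (x_A y_A x_B y_B x_prize y_prize n_max price_A price_B : Int)
    (o : Option (Int × Int × Int)) (a : Int) : Option (Int × Int × Int) :=
  match pvCand x_A y_A x_B y_B x_prize y_prize n_max price_B a with
  | none => o
  | some b =>
    let cost := a * price_A + b * price_B
    match o with
    | none => some (cost, a, b)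
    | some best => if cost < best.1 then some (cost, a, b) else some best

def compute_find_cheapest_brute_force_alt (x_A : Int) (y_A : Int) (x_B : Int) (y_B : Int) (x_prize : Int) (y_prize : Int) (n_max : Int) (price_A : Int) (price_B : Int) : List Int :=
  match (PySem.List.pyRange 1 (n_max + 1) 1).foldl
      (pvStepB x_A y_A x_B y_B x_prize y_prize n_max price_A price_B) none with
  | none => [0, 0, 0]
  | some (c, a, b) => [c, a, b]

-- ===== PRECONDITION & SPEC =====
def Spec_compute_find_cheapest_brute_force (x_A : Int) (y_A : Int) (x_B : Int) (y_B : Int) (x_prize : Int) (y_prize : Int) (n_max : Int) (price_A : Int) (price_B : Int) (out : List Int) : Prop := out = compute_find_cheapest_brute_force_alt x_A y_A x_B y_B x_prize y_prize n_max price_A price_B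
instance (x_A : Int) (y_A : Int) (x_B : Int) (y_B : Int) (x_prize : Int) (y_prize : Int) (n_max : Int) (price_A : Int) (price_B : Int) (out : List Int) : Decidable (Spec_compute_find_cheapest_brute_force x_A y_A x_B y_B x_prize y_prize n_max price_A price_B out) := by unfold Spec_compute_find_cheapest_brute_force; infer_instance

-- ===== CLAIM (what is proved, stated in full; the proofs are below) =====
def Claim_equal_compute_find_cheapest_brute_force : Prop := ∀ (x_A : Int) (y_A : Int) (x_B : Int) (y_B : Int) (x_prize : Int) (y_prize : Int) (n_max : Int) (price_A : Int) (price_B : Int), Dom_compute_find_cheapest_brute_force x_A y_A x_B y_B x_prize y_prize n_max price_A price_B → Spec_compute_find_cheapest_brute_force x_A y_A x_B y_B x_prize y_prize n_max price_A price_B (compute_find_cheapest_brute_force x_A y_A x_B y_B x_prize y_prize n_max price_A price_B)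

-- ===== LEMMAS AND PROOFS =====

-- abstraction from B's optional best to A's (cheapest, nA, nB, is_first) state
def pvAbs : Option (Int × Int × Int) → Int × Int × Int × Bool
  | none => (0, 0, 0, true)
  | some (c, a, b) => (c, a, b, false)

-- a fold whose steps never change the state is the identity
theorem pv_foldl_fix {α β : Type} (f : β → α → β) (l : List α)
    (h : ∀ s x, x ∈ l → f s x = s) (s : β) : l.foldl f s = s := by
  induction l generalizing s with
  | nil => rfl
  | cons x xs ih =>
    simp only [List.foldl_cons, h s x (by simp)]
    exact ih (fun s x hx => h s x (List.mem_cons_of_mem _ hx)) s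

-- a strictly better candidate absorbs an earlier update
theorem pvU_absorb (s : Int × Int × Int × Bool) (c1 a1 b1 c2 a2 b2 : Int)
    (h : c2 < c1) : pvU (pvU s c1 a1 b1) c2 a2 b2 = pvU s c2 a2 b2 := by
  simp only [pvU]
  split_ifs <;> simp_all <;> omega

-- pvU with a candidate that is not an improvement is the identity
theorem pvU_id (s : Int × Int × Int × Bool) (c a b : Int)
    (h1 : ¬ c < s.1) (h2 : s.2.2.2 = false) : pvU s c a b = s := by
  simp [pvU, h1, h2]

-- free-b case, price_B < 0: scanning all b keeps the last (cheapest) one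
theorem pv_fold_free_neg (pA pB a n : Int) (hp : pB < 0) (hn : 1 ≤ n)
    (s : Int × Int × Int × Bool) :
    (PySem.List.pyRange 1 (n + 1) 1).foldl (fun s b => pvU s (a * pA + b * pB) a b) s
      = pvU s (a * pA + n * pB) a n := by
  obtain ⟨k, rfl⟩ : ∃ k : Nat, n = (k : Int) + 1 := ⟨(n - 1).toNat, by omega⟩
  induction k generalizing s with
  | zero =>
    rw [PySem.List.pyRange_one_succ_right (by omega),
        PySem.List.pyRange_one_eq_nil (by omega)]
    simp
  | succ m ih =>
    push_cast
    rw [PySem.List.pyRange_one_succ_right (by omega), List.foldl_append,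
        ih s (by omega)]
    simp only [List.foldl_cons, List.foldl_nil]
    exact pvU_absorb _ _ _ _ _ _ _ (by nlinarith)

-- free-b case, price_B ≥ 0: only b = 1 matters
theorem pv_foldl_fix_at {α β : Type} (f : β → α → β) (l : List α) (s : β)
    (h : ∀ x ∈ l, f s x = s) : l.foldl f s = s := by
  induction l with
  | nil => rfl
  | cons x xs ih =>
    simp only [List.foldl_cons, h x (by simp)]
    exact ih (fun x hx => h x (List.mem_cons_of_mem _ hx))

theorem pv_fold_free_nonneg (pA pB a n : Int) (hp : 0 ≤ pB) (hn : 1 ≤ n)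
    (s : Int × Int × Int × Bool) :
    (PySem.List.pyRange 1 (n + 1) 1).foldl (fun s b => pvU s (a * pA + b * pB) a b) s
      = pvU s (a * pA + 1 * pB) a 1 := by
  rw [PySem.List.pyRange_one_cons (by omega)]
  simp only [List.foldl_cons]
  apply pv_foldl_fix_at
  intro b hb
  rw [PySem.List.mem_pyRange_one] at hb
  have hkey : (pvU s (a * pA + 1 * pB) a 1).2.2.2 = false ∧
      (pvU s (a * pA + 1 * pB) a 1).1 ≤ a * pA + 1 * pB := by
    simp only [pvU]; split_ifs with h
    · exact ⟨rfl, le_refl _⟩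
    · push Not at h; exact ⟨by simpa using h.2, h.1⟩
  exact pvU_id _ _ _ _ (by nlinarith [hkey.2]) hkey.1

-- at most one b can satisfy the pair of equations: the fold reduces to one test
theorem pv_fold_single (xA yA xB yB xp yp pA pB a n b0 : Int)
    (huniq : ∀ b, a * xA + b * xB = xp ∧ a * yA + b * yB = yp → b = b0)
    (s : Int × Int × Int × Bool) :
    (PySem.List.pyRange 1 (n + 1) 1).foldl (pvStepA xA yA xB yB xp yp pA pB a) s
      = if 1 ≤ b0 ∧ b0 ≤ n ∧ a * xA + b0 * xB = xp ∧ a * yA + b0 * yB = yp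
        then pvU s (a * pA + b0 * pB) a b0 else s := by
  split_ifs with h
  · obtain ⟨h1, h2, h3, h4⟩ := h
    rw [PySem.List.pyRange_one_append 1 b0 (n + 1) (by omega) (by omega),
        PySem.List.pyRange_one_cons (show b0 < n + 1 by omega), List.foldl_append]
    rw [pv_foldl_fix _ _ (fun s' b hb => by
      rw [PySem.List.mem_pyRange_one] at hb
      simp only [pvStepA]
      rw [if_neg]
      intro hc; have := huniq b hc; omega) s]
    simp only [List.foldl_cons]
    have hb0 : pvStepA xA yA xB yB xp yp pA pB a s b0 = pvU s (a * pA + b0 * pB) a b0 := by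
      simp only [pvStepA]; rw [if_pos (⟨h3, h4⟩ : _ ∧ _)]
    rw [hb0]
    apply pv_foldl_fix
    intro s' b hb
    rw [PySem.List.mem_pyRange_one] at hb
    simp only [pvStepA]
    rw [if_neg]
    intro hc; have := huniq b hc; omega
  · apply pv_foldl_fix
    intro s' b hb
    rw [PySem.List.mem_pyRange_one] at hb
    simp only [pvStepA]
    rw [if_neg]
    intro hc
    have hb0 := huniq b hc
    subst hb0
    exact h ⟨by omega, by omega, hc.1, hc.2⟩

-- exact division: if b * d = r with d ≠ 0 then Python r // d = b
theorem pv_floordiv_exact (r d b : Int) (hd : d ≠ 0) (h : b * d = r) :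
    PySem.Int.floordiv r d = b := by
  have hm : PySem.Int.mod r d = 0 := by
    rw [PySem.Int.mod_eq_zero_iff_dvd]; exact ⟨b, by linarith [h, mul_comm b d]⟩
  have := PySem.Int.floordiv_mul_add_mod r d
  rw [hm, add_zero] at this
  have : PySem.Int.floordiv r d * d = b * d := by rw [this, h]
  exact mul_right_cancel₀ hd this

-- KEY: A's inner loop over b equals B's per-a candidate computation
theorem pv_inner (xA yA xB yB xp yp n pA pB a : Int) (ha1 : 1 ≤ a) (ha2 : a ≤ n)
    (s : Int × Int × Int × Bool) :
    (PySem.List.pyRange 1 (n + 1) 1).foldl (pvStepA xA yA xB yB xp yp pA pB a) s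
      = match pvCand xA yA xB yB xp yp n pB a with
        | none => s
        | some b => pvU s (a * pA + b * pB) a b := by
  by_cases hxB : xB ≠ 0
  · set q := PySem.Int.floordiv (xp - a * xA) xB with hq
    rw [pv_fold_single xA yA xB yB xp yp pA pB a n q
      (fun b hb => (pv_floordiv_exact _ _ _ hxB (by linarith [hb.1])).symm.trans hq.symm) s]
    simp only [pvCand, if_pos hxB]
    rw [← hq]
    by_cases hc : q * xB = xp - a * xA ∧ 1 ≤ q ∧ q ≤ n ∧ q * yB = yp - a * yA
    · rw [if_pos hc, if_pos ⟨hc.2.1, hc.2.2.1, by linarith [hc.1], by linarith [hc.2.2.2]⟩]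
    · rw [if_neg hc, if_neg]
      intro ⟨h1, h2, h3, h4⟩
      exact hc ⟨by linarith [h3], h1, h2, by linarith [h4]⟩
  · push Not at hxB
    subst hxB
    by_cases hyB : yB ≠ 0
    · set q := PySem.Int.floordiv (yp - a * yA) yB with hq
      rw [pv_fold_single xA yA 0 yB xp yp pA pB a n q
        (fun b hb => (pv_floordiv_exact _ _ _ hyB (by linarith [hb.2])).symm.trans hq.symm) s]
      simp only [pvCand, if_pos hyB]
      simp only [ne_eq, not_true_eq_false, if_false]
      rw [← hq]
      by_cases hc : xp - a * xA = 0 ∧ q * yB = yp - a * yA ∧ 1 ≤ q ∧ q ≤ n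
      · rw [if_pos hc, if_pos ⟨hc.2.2.1, hc.2.2.2, by linarith [hc.1], by linarith [hc.2.1]⟩]
      · rw [if_neg hc, if_neg]
        intro ⟨h1, h2, h3, h4⟩
        exact hc ⟨by linarith [h3], by linarith [h4], h1, h2⟩
    · push Not at hyB
      subst hyB
      simp only [pvCand, ne_eq, not_true_eq_false, if_false]
      by_cases hc : xp - a * xA = 0 ∧ yp - a * yA = 0
      · rw [if_pos hc]
        have hstep : pvStepA xA yA 0 0 xp yp pA pB a =
            fun s b => pvU s (a * pA + b * pB) a b := by
          funext s' b
          simp only [pvStepA]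
          rw [if_pos ⟨by linarith [hc.1], by linarith [hc.2]⟩]
        rw [hstep]
        by_cases hp : pB < 0
        · rw [if_pos hp]
          exact pv_fold_free_neg pA pB a n hp (by omega) s
        · rw [if_neg hp]
          have := pv_fold_free_nonneg pA pB a n (by omega) (by omega) s
          simpa using this
      · rw [if_neg hc]
        apply pv_foldl_fix
        intro s' b hb
        simp only [pvStepA]
        rw [if_neg]
        intro ⟨h1, h2⟩
        exact hc ⟨by linarith [h1], by linarith [h2]⟩

-- one outer step commutes with the abstraction
theorem pv_step_commute (xA yA xB yB xp yp n pA pB a : Int) (ha1 : 1 ≤ a) (ha2 : a ≤ n)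
    (o : Option (Int × Int × Int)) :
    (PySem.List.pyRange 1 (n + 1) 1).foldl (pvStepA xA yA xB yB xp yp pA pB a) (pvAbs o)
      = pvAbs (pvStepB xA yA xB yB xp yp n pA pB o a) := by
  rw [pv_inner xA yA xB yB xp yp n pA pB a ha1 ha2]
  simp only [pvStepB]
  cases hcand : pvCand xA yA xB yB xp yp n pB a with
  | none => rfl
  | some b =>
    cases o with
    | none => simp [pvAbs, pvU]
    | some best =>
      obtain ⟨c1, a1, b1⟩ := best
      simp only [pvAbs, pvU]
      by_cases hlt : a * pA + b * pB < c1
      · rw [if_pos (Or.inl hlt), if_pos hlt]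
      · rw [if_neg (by simp [hlt]), if_neg hlt]

-- the whole outer fold commutes with the abstraction
theorem pv_fold_commute (xA yA xB yB xp yp n pA pB : Int) (l : List Int)
    (hl : ∀ x ∈ l, 1 ≤ x ∧ x ≤ n) (o : Option (Int × Int × Int)) :
    l.foldl (fun s iA => (PySem.List.pyRange 1 (n + 1) 1).foldl
        (pvStepA xA yA xB yB xp yp pA pB iA) s) (pvAbs o)
      = pvAbs (l.foldl (pvStepB xA yA xB yB xp yp n pA pB) o) := by
  induction l generalizing o with
  | nil => rfl
  | cons a xs ih =>
    have ha := hl a (by simp)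
    simp only [List.foldl_cons]
    rw [pv_step_commute xA yA xB yB xp yp n pA pB a ha.1 ha.2 o]
    exact ih (fun x hx => hl x (List.mem_cons_of_mem _ hx)) _

-- ===== VERDICT (by name: the statement is the Claim_ definition above) =====
theorem compute_find_cheapest_brute_force_spec : Claim_equal_compute_find_cheapest_brute_force := by
  intro xA yA xB yB xp yp n pA pB _
  unfold Spec_compute_find_cheapest_brute_force
  unfold compute_find_cheapest_brute_force compute_find_cheapest_brute_force_alt
  have := pv_fold_commute xA yA xB yB xp yp n pA pB (PySem.List.pyRange 1 (n + 1) 1)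
    (fun x hx => by rw [PySem.List.mem_pyRange_one] at hx; omega) none
  simp only [pvAbs] at this
  rw [this]
  cases h : (PySem.List.pyRange 1 (n + 1) 1).foldl (pvStepB xA yA xB yB xp yp n pA pB) none with
  | none => rfl
  | some best => obtain ⟨c, a, b⟩ := best; rfl
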